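-- pv_equiv track=rewrite | github.com/Hillel-Python-Automation/python_automation | hw_12/error_handler/_try_except_finally.py | pizza_ingredients
-- ===== SOURCE A (Python) =====
-- def pizza_ingredients(user_ingredients):
--     user_in = []
--
--     for ingredient in user_ingredients.split():
--         if ingredient not in ingredients:
--             raise Exception(
--                 f"Please, choose ingredients from the list: {ingredients}")
--
--         user_in.append(ingredient)
--
--     return user_in
--
-- ingredients = ["tomato", "cheese", "olive", "prosciutto", "pear", "honey"]
-- ===== SOURCE B (Python) =====
-- ingredients = ["tomato", "cheese", "olive", "prosciutto", "pear", "honey"]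
--
-- def pizza_ingredients(user_ingredients):
--     words = user_ingredients.split()
--     # Validate by counting from the other side: iterate over the fixed
--     # (duplicate-free) ingredient list and count how many of the input words
--     # each one accounts for; the input is valid iff those counts add up to
--     # the total number of words.
--     if sum(words.count(i) for i in ingredients) != len(words):
--         raise Exception(
--             f"Please, choose ingredients from the list: {ingredients}")
--     return words
-- ===== Notes on version B (the rewrite author's own statement) =====
-- stated objective: alternative
-- what changed: Instead of scanning the input words and testing each against the allowed list, B iterates over the fixed duplicate-free ingredient list, counts the occurrences of each ingredient among the split words, and accepts iff those counts sum to the number of words, returning the split list directly (no append accumulator, no per-word branch).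
import Mathlib
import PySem

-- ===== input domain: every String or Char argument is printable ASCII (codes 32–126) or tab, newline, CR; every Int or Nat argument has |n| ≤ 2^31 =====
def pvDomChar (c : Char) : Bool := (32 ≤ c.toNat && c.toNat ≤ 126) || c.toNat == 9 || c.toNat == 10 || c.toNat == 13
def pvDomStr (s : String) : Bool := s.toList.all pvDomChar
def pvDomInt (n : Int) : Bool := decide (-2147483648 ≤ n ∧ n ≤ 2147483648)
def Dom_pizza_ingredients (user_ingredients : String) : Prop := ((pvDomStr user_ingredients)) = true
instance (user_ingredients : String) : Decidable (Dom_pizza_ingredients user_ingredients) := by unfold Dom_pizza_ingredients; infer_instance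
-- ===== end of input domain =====

-- B validates from the other side: it counts each fixed ingredient's occurrences among
-- the split words and accepts iff the counts sum to the word total, returning the split
-- list directly — no per-word membership branch, no append accumulator (objective: alternative).

def ingredientsList : List String := ["tomato", "cheese", "olive", "prosciutto", "pear", "honey"]

-- ===== PORT A =====
-- A's loop: append each word, raising (none) on the first word not in the list.
def pizzaLoopA : List String → List String → Option (List String)
  | acc, [] => some acc
  | acc, w :: ws =>
      if ingredientsList.contains w then pizzaLoopA (acc ++ [w]) ws
      else none    -- raise Exception

def pizza_ingredients (user_ingredients : String) : List String :=
  (pizzaLoopA [] (PySem.Str.split₀ user_ingredients)).getD []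

-- ===== PORT B =====
def pizza_ingredients_alt (user_ingredients : String) : List String :=
  let words := PySem.Str.split₀ user_ingredients
  -- sum(words.count(i) for i in ingredients) != len(words) → raise (excluded by Pre_)
  if (ingredientsList.map (fun i => PySem.List.count words i)).sum ≠ words.length then []
  else words

-- ===== PRECONDITION & SPEC =====
-- Pre_: every whitespace-separated word is a listed ingredient; otherwise A raises.
def Pre_pizza_ingredients (user_ingredients : String) : Prop :=
  ∀ w ∈ PySem.Str.split₀ user_ingredients, w ∈ ingredientsList

instance (user_ingredients : String) : Decidable (Pre_pizza_ingredients user_ingredients) := by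
  unfold Pre_pizza_ingredients; infer_instance

def pvWitness_pizza_ingredients : String := "tomato  cheese pear"

def Spec_pizza_ingredients (user_ingredients : String) (out : List String) : Prop := out = pizza_ingredients_alt user_ingredients
instance (user_ingredients : String) (out : List String) : Decidable (Spec_pizza_ingredients user_ingredients out) := by unfold Spec_pizza_ingredients; infer_instance

-- ===== CLAIM (what is proved, stated in full; the proofs are below) =====
def Claim_equal_pizza_ingredients : Prop := ∀ (user_ingredients : String), Dom_pizza_ingredients user_ingredients → Pre_pizza_ingredients user_ingredients → Spec_pizza_ingredients user_ingredients (pizza_ingredients user_ingredients)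

-- ===== LEMMAS AND PROOFS =====

theorem pizzaLoopA_ok (ws : List String) (h : ∀ w ∈ ws, w ∈ ingredientsList) :
    ∀ acc, pizzaLoopA acc ws = some (acc ++ ws) := by
  induction ws with
  | nil => intro acc; simp [pizzaLoopA]
  | cons w ws ih =>
      intro acc
      have hw : w ∈ ingredientsList := h w (by simp)
      simp [pizzaLoopA, hw, ih (fun x hx => h x (by simp [hx]))]

theorem sum_map_indicator (w : String) (L : List String) :
    (L.map (fun i => if w == i then (1 : Nat) else 0)).sum = L.count w := by
  induction L with
  | nil => simp
  | cons i L ih =>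
      rw [List.map_cons, List.sum_cons, List.count_cons, ih]
      by_cases hwi : i = w
      · subst hwi; simp; omega
      · have h1 : (w == i) = false := beq_false_of_ne (Ne.symm hwi)
        have h2 : (i == w) = false := beq_false_of_ne hwi
        simp [h1, h2]

theorem sum_counts (L : List String) (hL : L.Nodup) (ws : List String)
    (h : ∀ w ∈ ws, w ∈ L) : (L.map (fun i => ws.count i)).sum = ws.length := by
  induction ws with
  | nil => simp
  | cons w ws ih =>
      have hsplit : (L.map (fun i => (w :: ws).count i)).sum
          = (L.map (fun i => ws.count i)).sum + (L.map (fun i => if w == i then (1 : Nat) else 0)).sum := by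
        rw [← List.sum_map_add]
        simp [List.count_cons]
      rw [hsplit, sum_map_indicator, ih (fun x hx => h x (by simp [hx])),
        List.count_eq_one_of_mem hL (h w (by simp))]
      simp

-- ===== VERDICT (by name: the statement is the Claim_ definition above) =====
theorem pizza_ingredients_spec : Claim_equal_pizza_ingredients := by
  intro s _ hpre
  unfold Spec_pizza_ingredients pizza_ingredients pizza_ingredients_alt
  have hnd : ingredientsList.Nodup := by decide
  simp only [pizzaLoopA_ok _ hpre, PySem.List.count_eq,
    sum_counts ingredientsList hnd _ hpre]
  simp
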